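-- pv_equiv track=rewrite | github.com/cobyforrester/adventofcode | 2024/4/p2.py | _corners_m_or_s
-- ===== SOURCE A (Python) =====
-- def _corners_m_or_s(
--     coordinate_pairs: tuple[tuple[int, int], tuple[int, int]], grid: list[list[str]]
-- ) -> bool:
--     """find if the coordinates correspond to an m and s pair"""
--     include = ["M", "S"]
--     for x, y in coordinate_pairs:
--         if x < 0 or y < 0 or x >= len(grid) or y >= len(grid[x]):
--             return False
--         try:
--             include.remove(grid[x][y])
--         except:
--             return False
--     # if we got here include is empty and the coordinates are M and S
--     return True
-- ===== SOURCE B (Python) =====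
-- def _corners_m_or_s(
--     coordinate_pairs: tuple[tuple[int, int], tuple[int, int]], grid: list[list[str]]
-- ) -> bool:
--     """find if the coordinates correspond to an m and s pair"""
--
--     def cell(x, y):
--         row = grid[x] if 0 <= x < len(grid) else None
--         return row[y] if row is not None and 0 <= y < len(row) else None
--
--     (x1, y1), (x2, y2) = coordinate_pairs
--     return (cell(x1, y1), cell(x2, y2)) in {("M", "S"), ("S", "M")}
-- ===== Notes on version B (the rewrite author's own statement) =====
-- stated objective: simpler
-- what changed: Replaces A's loop that mutates an include-list with try/except remove by a branch-free expression: fetch each corner via a total cell(x,y)->Optional[str] helper and test the resulting pair against the two admissible permutations {('M','S'),('S','M')}.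
import Mathlib
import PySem

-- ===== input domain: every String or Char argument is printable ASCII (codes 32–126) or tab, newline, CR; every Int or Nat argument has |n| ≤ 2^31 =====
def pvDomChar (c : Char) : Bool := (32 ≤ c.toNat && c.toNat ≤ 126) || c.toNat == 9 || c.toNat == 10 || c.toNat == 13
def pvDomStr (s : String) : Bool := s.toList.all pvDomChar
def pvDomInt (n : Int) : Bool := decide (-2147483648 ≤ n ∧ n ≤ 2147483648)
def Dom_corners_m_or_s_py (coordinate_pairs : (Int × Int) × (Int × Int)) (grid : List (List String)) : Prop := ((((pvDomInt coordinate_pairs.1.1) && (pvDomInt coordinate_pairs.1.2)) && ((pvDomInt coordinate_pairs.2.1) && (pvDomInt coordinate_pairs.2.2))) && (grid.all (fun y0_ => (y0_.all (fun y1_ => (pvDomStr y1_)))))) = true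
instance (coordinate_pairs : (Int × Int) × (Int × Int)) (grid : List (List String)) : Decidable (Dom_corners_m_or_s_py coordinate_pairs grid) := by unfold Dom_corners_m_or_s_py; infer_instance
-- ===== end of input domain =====

-- B replaces A's loop over a mutable include-list (try/except remove, early returns) by a
-- branch-free expression: a total cell lookup per corner, then membership of the fetched pair
-- in the two admissible permutations; objective: simpler.

-- ===== PORT A =====
-- one for-loop iteration of A: bounds check (early 'return False' = none), then
-- include.remove(grid[x][y]) (none = the caught ValueError / 'return False')
def cornersStepA (grid : List (List String)) (include_ : List String) (p : Int × Int) : Option (List String) :=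
  let x := p.1
  let y := p.2
  let row := (PySem.List.pyGet? grid x).getD []
  if x < 0 ∨ y < 0 ∨ (grid.length : Int) ≤ x ∨ (row.length : Int) ≤ y then none
  else PySem.List.remove? include_ ((PySem.List.pyGet? row y).getD "")

def corners_m_or_s_py (coordinate_pairs : (Int × Int) × (Int × Int)) (grid : List (List String)) : Bool :=
  match cornersStepA grid ["M", "S"] coordinate_pairs.1 with
  | none => false
  | some include1 =>
    match cornersStepA grid include1 coordinate_pairs.2 with
    | none => false
    | some _ => true

-- ===== PORT B =====
-- B's cell(x, y): 'grid[x] if 0 <= x < len(grid) else None', then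
-- 'row[y] if row is not None and 0 <= y < len(row) else None'
def pvCellB (grid : List (List String)) (x y : Int) : Option String :=
  let row : Option (List String) :=
    if 0 ≤ x ∧ x < (grid.length : Int) then PySem.List.pyGet? grid x else none
  match row with
  | none => none
  | some r => if 0 ≤ y ∧ y < (r.length : Int) then PySem.List.pyGet? r y else none

-- '(cell(x1, y1), cell(x2, y2)) in {("M", "S"), ("S", "M")}'
def corners_m_or_s_py_alt (coordinate_pairs : (Int × Int) × (Int × Int)) (grid : List (List String)) : Bool :=
  decide ((pvCellB grid coordinate_pairs.1.1 coordinate_pairs.1.2,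
           pvCellB grid coordinate_pairs.2.1 coordinate_pairs.2.2)
          ∈ [(some "M", some "S"), (some "S", some "M")])

-- ===== PRECONDITION & SPEC =====
def Spec_corners_m_or_s_py (coordinate_pairs : (Int × Int) × (Int × Int)) (grid : List (List String)) (out : Bool) : Prop := out = corners_m_or_s_py_alt coordinate_pairs grid
instance (coordinate_pairs : (Int × Int) × (Int × Int)) (grid : List (List String)) (out : Bool) : Decidable (Spec_corners_m_or_s_py coordinate_pairs grid out) := by unfold Spec_corners_m_or_s_py; infer_instance

-- ===== CLAIM (what is proved, stated in full; the proofs are below) =====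
def Claim_equal_corners_m_or_s_py : Prop := ∀ (coordinate_pairs : (Int × Int) × (Int × Int)) (grid : List (List String)), Dom_corners_m_or_s_py coordinate_pairs grid → Spec_corners_m_or_s_py coordinate_pairs grid (corners_m_or_s_py coordinate_pairs grid)

-- ===== LEMMAS AND PROOFS =====

-- A's loop step succeeds on the same cells B's total lookup fetches
lemma stepA_eq (grid : List (List String)) (include_ : List String) (p : Int × Int) :
    cornersStepA grid include_ p =
      match pvCellB grid p.1 p.2 with
      | none => none
      | some c => PySem.List.remove? include_ c := by
  unfold cornersStepA pvCellB
  by_cases hx : 0 ≤ p.1 ∧ p.1 < (grid.length : Int)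
  · simp only [if_pos hx]
    have hg : PySem.List.pyGet? grid p.1 = some (grid.get ⟨p.1.toNat, by omega⟩) := by
      rw [PySem.List.pyGet?_of_nonneg _ hx.1]
      simp [List.getElem?_eq_getElem (by omega : p.1.toNat < grid.length)]
    rw [hg]
    by_cases hy : 0 ≤ p.2 ∧ p.2 < (((grid.get ⟨p.1.toNat, by omega⟩ : List String).length : Int))
    · simp only [if_pos hy, Option.getD_some]
      rw [if_neg (by omega)]
      have hr : PySem.List.pyGet? (grid.get ⟨p.1.toNat, by omega⟩) p.2
          = some ((grid.get ⟨p.1.toNat, by omega⟩ : List String).get ⟨p.2.toNat, by omega⟩) := by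
        rw [PySem.List.pyGet?_of_nonneg _ hy.1]
        exact List.getElem?_eq_getElem (by omega)
      rw [hr]
      rfl
    · simp only [if_neg hy, Option.getD_some]
      rw [if_pos (by omega)]
  · simp only [if_neg hx]
    have hg : PySem.List.pyGet? grid p.1 = none ∨ p.1 < 0 := by
      by_cases h0 : p.1 < 0
      · exact Or.inr h0
      · left
        apply (PySem.List.pyGet?_eq_none_iff _ _).mpr
        unfold PySem.Raise.InRange
        omega
    rw [if_pos (by omega)]

-- the pointwise fact: removing c1 then c2 from ["M","S"] succeeds iff (c1,c2) is (M,S) or (S,M)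
lemma remove_chain_eq_pairs (c1 c2 : String) :
    (match PySem.List.remove? ["M", "S"] c1 with
     | none => false
     | some inc =>
       match PySem.List.remove? inc c2 with
       | none => false
       | some _ => true)
    = decide ((some c1, some c2) ∈ [((some "M" : Option String), (some "S" : Option String)), (some "S", some "M")]) := by
  by_cases h1 : c1 = "M"
  · subst h1
    by_cases h2 : c2 = "S"
    · subst h2; decide
    · have hr1 : PySem.List.remove? ["M", "S"] "M" = some ["S"] := by decide
      have hr2 : PySem.List.remove? ["S"] c2 = none :=
        (PySem.List.remove?_eq_none_iff _ _).mpr (by simp [h2])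
      simp [hr1, hr2, h2]
  · by_cases h1' : c1 = "S"
    · subst h1'
      by_cases h2 : c2 = "M"
      · subst h2; decide
      · have hr1 : PySem.List.remove? ["M", "S"] "S" = some ["M"] := by decide
        have hr2 : PySem.List.remove? ["M"] c2 = none :=
          (PySem.List.remove?_eq_none_iff _ _).mpr (by simp [h2])
        simp [hr1, hr2, h2]
    · have hr1 : PySem.List.remove? ["M", "S"] c1 = none :=
        (PySem.List.remove?_eq_none_iff _ _).mpr (by simp [h1, h1'])
      simp [hr1, h1, h1']

-- ===== VERDICT (by name: the statement is the Claim_ definition above) =====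
theorem corners_m_or_s_py_spec : Claim_equal_corners_m_or_s_py := by
  intro cp grid _
  unfold Spec_corners_m_or_s_py corners_m_or_s_py corners_m_or_s_py_alt
  simp only [stepA_eq]
  cases hf1 : pvCellB grid cp.1.1 cp.1.2 with
  | none => simp
  | some c1 =>
    cases hf2 : pvCellB grid cp.2.1 cp.2.2 with
    | none =>
      split <;> simp
    | some c2 =>
      exact remove_chain_eq_pairs c1 c2
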